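-- pv_equiv track=rewrite | github.com/AEDA-Solutions/uniwallet | helpers/general.py | fit_pair_to_list
-- ===== SOURCE A (Python) =====
-- def fit_pair_to_list(pair_list, new_pair):
-- 	new_pair_list = []
-- 	for pair in pair_list:
-- 		if new_pair and pair[0] == new_pair[0]:
-- 			new_pair_list.append(new_pair)
-- 			new_pair = None
-- 		else:
-- 			new_pair_list.append(pair)
-- 	if new_pair:
-- 		new_pair_list.append(new_pair)
-- 	return new_pair_list
-- ===== SOURCE B (Python) =====
-- def fit_pair_to_list(pair_list, new_pair):
--     if not new_pair:
--         return list(pair_list)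
--     idx = next((i for i, p in enumerate(pair_list) if p[0] == new_pair[0]), None)
--     if idx is None:
--         return pair_list + [new_pair]
--     return pair_list[:idx] + [new_pair] + pair_list[idx + 1:]
-- ===== Notes on version B (the rewrite author's own statement) =====
-- stated objective: idiomatic
-- what changed: B first locates the index of the matching key with enumerate/next and rebuilds the result by slicing, instead of A's element-by-element accumulation with a flag that nulls new_pair.
import Mathlib
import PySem

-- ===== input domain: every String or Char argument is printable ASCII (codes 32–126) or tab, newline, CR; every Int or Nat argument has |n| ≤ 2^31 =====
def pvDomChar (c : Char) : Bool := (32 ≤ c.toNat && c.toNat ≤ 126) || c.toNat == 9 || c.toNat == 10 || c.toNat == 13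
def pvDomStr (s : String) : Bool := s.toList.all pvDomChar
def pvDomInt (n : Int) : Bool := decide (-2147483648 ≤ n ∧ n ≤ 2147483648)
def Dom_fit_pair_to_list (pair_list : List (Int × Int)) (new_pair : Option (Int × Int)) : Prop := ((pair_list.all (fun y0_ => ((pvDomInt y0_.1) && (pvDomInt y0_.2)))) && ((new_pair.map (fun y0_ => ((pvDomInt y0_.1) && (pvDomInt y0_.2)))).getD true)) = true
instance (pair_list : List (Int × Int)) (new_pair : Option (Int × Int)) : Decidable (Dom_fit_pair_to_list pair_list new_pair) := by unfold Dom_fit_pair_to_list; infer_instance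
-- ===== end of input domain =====

-- B rebuilds the list by locating the matching index first and slicing, instead of A's
-- single accumulating loop with a nulling flag (objective: idiomatic; same return value).

-- ===== PORT A =====
-- A's for-loop: accumulator new_pair_list and the mutable new_pair variable are the loop state.
def fitLoopA : List (Int × Int) → List (Int × Int) → Option (Int × Int) → List (Int × Int) × Option (Int × Int)
  | [], acc, np => (acc, np)
  | pair :: rest, acc, np =>
    match np with
    | some n =>
      if pair.1 = n.1 then fitLoopA rest (acc ++ [n]) none
      else fitLoopA rest (acc ++ [pair]) (some n)
    | none => fitLoopA rest (acc ++ [pair]) none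

def fit_pair_to_list (pair_list : List (Int × Int)) (new_pair : Option (Int × Int)) : List (Int × Int) :=
  let st := fitLoopA pair_list [] new_pair
  match st.2 with
  | some n => st.1 ++ [n]   -- trailing 'if new_pair: append'
  | none => st.1

-- ===== PORT B =====
-- 'next((i for i,p in enumerate(pair_list) if p[0]==new_pair[0]), None)' → findIdx?;
-- the slices pair_list[:idx] / pair_list[idx+1:] (idx ≥ 0) → take idx / drop (idx+1).
def fit_pair_to_list_alt (pair_list : List (Int × Int)) (new_pair : Option (Int × Int)) : List (Int × Int) :=
  match new_pair with
  | none => pair_list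
  | some n =>
    match pair_list.findIdx? (fun p => p.1 == n.1) with
    | none => pair_list ++ [n]
    | some i => pair_list.take i ++ [n] ++ pair_list.drop (i + 1)

-- ===== PRECONDITION & SPEC =====
def Spec_fit_pair_to_list (pair_list : List (Int × Int)) (new_pair : Option (Int × Int)) (out : List (Int × Int)) : Prop := out = fit_pair_to_list_alt pair_list new_pair
instance (pair_list : List (Int × Int)) (new_pair : Option (Int × Int)) (out : List (Int × Int)) : Decidable (Spec_fit_pair_to_list pair_list new_pair out) := by unfold Spec_fit_pair_to_list; infer_instance

-- ===== CLAIM (what is proved, stated in full; the proofs are below) =====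
def Claim_equal_fit_pair_to_list : Prop := ∀ (pair_list : List (Int × Int)) (new_pair : Option (Int × Int)), Dom_fit_pair_to_list pair_list new_pair → Spec_fit_pair_to_list pair_list new_pair (fit_pair_to_list pair_list new_pair)

-- ===== LEMMAS AND PROOFS =====
theorem fitLoopA_acc (l : List (Int × Int)) :
    ∀ acc np, fitLoopA l acc np = (acc ++ (fitLoopA l [] np).1, (fitLoopA l [] np).2) := by
  induction l with
  | nil => intro acc np; simp [fitLoopA]
  | cons p rest ih =>
    intro acc np
    cases np with
    | none => simp [fitLoopA]; rw [ih, ih [p]]; simp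
    | some n =>
      by_cases h : p.1 = n.1 <;> simp [fitLoopA, h]
      · rw [ih, ih [n]]; simp
      · rw [ih, ih [p]]; simp

theorem fitLoopA_none (l : List (Int × Int)) : ∀ acc, fitLoopA l acc none = (acc ++ l, none) := by
  induction l with
  | nil => intro acc; simp [fitLoopA]
  | cons p rest ih => intro acc; simp [fitLoopA, ih]

theorem fit_main (l : List (Int × Int)) (np : Option (Int × Int)) :
    fit_pair_to_list l np = fit_pair_to_list_alt l np := by
  cases np with
  | none => simp [fit_pair_to_list, fit_pair_to_list_alt, fitLoopA_none]
  | some n =>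
    induction l with
    | nil =>
      simp only [fit_pair_to_list, fit_pair_to_list_alt, fitLoopA]
      split <;> simp_all
    | cons p rest ih =>
      by_cases h : p.1 = n.1
      · simp [fit_pair_to_list, fit_pair_to_list_alt, fitLoopA, h, fitLoopA_none,
          List.findIdx?_cons]
      · have hb : (p.1 == n.1) = false := by simp [h]
        simp only [fit_pair_to_list, fit_pair_to_list_alt] at ih ⊢
        rw [show fitLoopA (p :: rest) [] (some n) = fitLoopA rest [p] (some n) by
              simp [fitLoopA, h]]
        rw [fitLoopA_acc rest [p] (some n)]
        simp only [List.findIdx?_cons, hb]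
        cases hfi : rest.findIdx? (fun q => q.1 == n.1) with
        | none =>
          simp only [hfi, Option.map_none] at ih ⊢
          cases hst : (fitLoopA rest [] (some n)).2 with
          | none => rw [hst] at ih; simp [ih]
          | some m => rw [hst] at ih; simp at ih ⊢; simp [ih]
        | some i =>
          simp only [hfi, Option.map_some] at ih ⊢
          cases hst : (fitLoopA rest [] (some n)).2 with
          | none => rw [hst] at ih; simp at ih ⊢; simp [ih]
          | some m => rw [hst] at ih; simp [ih]

-- ===== VERDICT (by name: the statement is the Claim_ definition above) =====
theorem fit_pair_to_list_spec : Claim_equal_fit_pair_to_list := by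
  intro l np _
  unfold Spec_fit_pair_to_list
  exact fit_main l np
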